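-- pv_equiv track=rewrite | github.com/posl/comment_recommendation | script/mod_gen/2_time/zh/277_D/2.py | solve
-- ===== SOURCE A (Python) =====
-- def solve(n, m, a):
--     a.sort()
--     a.append(m+a[0])
--     d = []
--     for i in range(n):
--         d.append(a[i+1]-a[i]-1)
--     d.sort()
--     ans = 0
--     for i in range(n-1):
--         ans += d[i]
--     return ans
-- ===== SOURCE B (Python) =====
-- def solve(n, m, a):
--     a.sort()
--     a.append(m + a[0])
--     if n <= 0:
--         return 0
--     total = 0
--     best = None
--     prev = a[0]
--     for x in a[1:n+1]:
--         g = x - prev - 1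
--         total += g
--         if best is None or g > best:
--             best = g
--         prev = x
--     return 0 if best is None else total - best
-- ===== Notes on version B (the rewrite author's own statement) =====
-- stated objective: simpler
-- what changed: Replaces building the gap list, sorting it a second time and summing all but the largest entry with one pass over the slice a[1:n+1] that accumulates the running gap total and the maximum gap directly (no intermediate list, no second sort), returning total - max.
import Mathlib
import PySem

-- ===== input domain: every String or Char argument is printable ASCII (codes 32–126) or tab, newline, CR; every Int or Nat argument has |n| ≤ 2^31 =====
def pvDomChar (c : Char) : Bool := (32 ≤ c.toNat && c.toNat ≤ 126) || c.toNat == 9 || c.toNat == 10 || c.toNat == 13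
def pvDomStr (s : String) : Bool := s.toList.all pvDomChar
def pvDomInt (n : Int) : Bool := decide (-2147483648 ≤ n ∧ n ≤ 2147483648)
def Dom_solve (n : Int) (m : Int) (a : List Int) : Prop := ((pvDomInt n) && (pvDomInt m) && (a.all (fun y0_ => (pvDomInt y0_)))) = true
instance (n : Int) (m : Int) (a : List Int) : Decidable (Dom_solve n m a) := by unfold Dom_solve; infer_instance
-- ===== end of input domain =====

-- B replaces A's build-gap-list + second sort + sum-all-but-largest with one pass over the slice
-- a[1:n+1] accumulating the running gap total and the maximum gap, returning total - max (simpler;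
-- both versions mutate `a` identically — sort then append — and the equivalence proved is about the return value).


-- ===== PORT A =====
def solve (n : Int) (m : Int) (a : List Int) : Int :=
  let s := PySem.List.sorted a (fun x => x)                      -- a.sort()
  let a0 := PySem.List.pyGetD s 0 0                              -- a[0]  (IndexError on [] is outside Pre_)
  let s2 := s ++ [m + a0]                                        -- a.append(m + a[0])
  let d := (PySem.List.pyRange 0 n 1).foldl                      -- for i in range(n): d.append(a[i+1]-a[i]-1)
      (fun acc i => acc ++ [PySem.List.pyGetD s2 (i + 1) 0 - PySem.List.pyGetD s2 i 0 - 1]) []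
  let dS := PySem.List.sorted d (fun x => x)                     -- d.sort()
  (PySem.List.pyRange 0 (n - 1) 1).foldl                         -- for i in range(n-1): ans += d[i]
      (fun ans i => ans + PySem.List.pyGetD dS i 0) 0

-- ===== PORT B =====
-- B-side helper: the body of Source B's for-loop over a[1:n+1] on the state (total, best, prev)
def solveBStep (st : Int × Option Int × Int) (x : Int) : Int × Option Int × Int :=
  let g := x - st.2.2 - 1
  (st.1 + g,
   some (match st.2.1 with | none => g | some b => if b < g then g else b),
   x)

def solve_alt (n : Int) (m : Int) (a : List Int) : Int :=
  let s := PySem.List.sorted a (fun x => x)                      -- a.sort()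
  let a0 := PySem.List.pyGetD s 0 0                              -- a[0]  (IndexError on [] is outside Pre_)
  let s2 := s ++ [m + a0]                                        -- a.append(m + a[0])
  if n ≤ 0 then 0                                                -- no gap exists
  else
    -- one pass: total, best (None until the first gap), prev; for x in a[1:n+1]
    let st := (PySem.List.slice s2 (some 1) (some (n + 1))).foldl solveBStep (0, none, a0)
    match st.2.1 with
    | none => 0                                                  -- 0 if best is None
    | some b => st.1 - b                                         -- total - best

-- ===== PRECONDITION & SPEC =====
-- exactly where A returns: a[0] needs a nonempty list, and the gap loop indexes a[i+1] for i < n,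
-- so A raises IndexError iff a == [] or n > len(a).
def Pre_solve (n : Int) (m : Int) (a : List Int) : Prop := a ≠ [] ∧ n ≤ (a.length : Int)
instance (n : Int) (m : Int) (a : List Int) : Decidable (Pre_solve n m a) := by unfold Pre_solve; infer_instance
def pvWitness_solve : Int × Int × List Int := (3, 10, [1, 4, 7])
def Spec_solve (n : Int) (m : Int) (a : List Int) (out : Int) : Prop := out = solve_alt n m a
instance (n : Int) (m : Int) (a : List Int) (out : Int) : Decidable (Spec_solve n m a out) := by unfold Spec_solve; infer_instance

-- ===== CLAIM (what is proved, stated in full; the proofs are below) =====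
def Claim_equal_solve : Prop := ∀ (n : Int) (m : Int) (a : List Int), Dom_solve n m a → Pre_solve n m a → Spec_solve n m a (solve n m a)

-- ===== LEMMAS AND PROOFS =====

-- the list of consecutive gaps of xs, seeded with previous element p (what B's pass consumes)
def pvGaps : Int → List Int → List Int
  | _, [] => []
  | p, x :: t => (x - p - 1) :: pvGaps x t

-- in a (· ≤ ·)-pairwise list every element is ≤ the last one
lemma pv_le_getLast (l : List Int) (h : l.Pairwise (· ≤ ·)) (hne : l ≠ []) :
    ∀ y ∈ l, y ≤ l.getLast hne := by
  intro y hy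
  induction l with
  | nil => simp at hy
  | cons x t ih =>
    rcases List.mem_cons.1 hy with rfl | hyt
    · cases t with
      | nil => simp at hy ⊢
      | cons z t' =>
        exact le_trans ((List.pairwise_cons.1 h).1 _ (List.getLast_mem _)) (le_refl _)
    · have ht : t ≠ [] := List.ne_nil_of_mem hyt
      rw [List.getLast_cons ht]
      exact ih (List.pairwise_cons.1 h).2 ht hyt

-- A's second loop sums all entries of E except the last one
lemma pv_sum_init (E : List Int) (hne : E ≠ []) :
    (PySem.List.pyRange 0 ((E.length : Int) - 1) 1).foldl
      (fun ans i => ans + PySem.List.pyGetD E i 0) 0 = E.sum - E.getLast hne := by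
  obtain ⟨P, x, hPx⟩ : ∃ P x, E = P ++ [x] := by
    refine ⟨E.dropLast, E.getLast hne, ?_⟩
    exact (List.dropLast_append_getLast hne).symm
  subst hPx
  have hlen : ((P ++ [x]).length : Int) - 1 = (P.length : Int) := by simp
  rw [hlen]
  have hcong : (PySem.List.pyRange 0 ((P.length : Int)) 1).foldl
      (fun ans i => ans + PySem.List.pyGetD (P ++ [x]) i 0) 0
      = (PySem.List.pyRange 0 ((P.length : Int)) 1).foldl
      (fun ans i => ans + PySem.List.pyGetD P i 0) 0 := by
    apply PySem.List.foldl_congr_mem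
    intro acc i hi
    have hi' := (PySem.List.mem_pyRange_one).1 hi
    have h1 : PySem.List.pyGetD (P ++ [x]) i 0 = (P ++ [x])[i.toNat] := by
      apply PySem.List.pyGetD_eq_getElem _ _ hi'.1
      simp; omega
    have h2 : PySem.List.pyGetD P i 0 = P[i.toNat] := by
      apply PySem.List.pyGetD_eq_getElem _ _ hi'.1
      omega
    rw [h1, h2, List.getElem_append_left]
  rw [hcong, PySem.List.foldl_pyRange_zero_pyGetD' P 0 (fun a b => a + b) 0,
      PySem.List.foldl_add P (fun y => y) 0]
  simp

-- B's fold: first component accumulates the sum of the gaps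
lemma pv_fold_fst : ∀ (xs : List Int) (t : Int) (ob : Option Int) (p : Int),
    (xs.foldl solveBStep (t, ob, p)).1 = t + (pvGaps p xs).sum := by
  intro xs
  induction xs with
  | nil => intro t ob p; simp [pvGaps]
  | cons x u ih =>
    intro t ob p
    simp only [List.foldl_cons, solveBStep, pvGaps, List.sum_cons]
    rw [ih]
    ring

-- B's fold, once seeded with some b: second component is the running max of b and the gaps
lemma pv_fold_snd : ∀ (xs : List Int) (t : Int) (b : Int) (p : Int),
    (xs.foldl solveBStep (t, some b, p)).2.1 = some ((pvGaps p xs).foldl max b) := by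
  intro xs
  induction xs with
  | nil => intro t b p; simp [pvGaps]
  | cons x u ih =>
    intro t b p
    simp only [List.foldl_cons, solveBStep, pvGaps]
    rw [ih]
    congr 2
    rcases lt_or_ge b (x - p - 1) with h | h
    · rw [if_pos h, max_eq_right (le_of_lt h)]
    · rw [if_neg (not_lt.2 h), max_eq_left h]

-- foldl max dominates its seed and every element
lemma pv_foldmax_ge : ∀ (l : List Int) (b : Int),
    b ≤ l.foldl max b ∧ ∀ y ∈ l, y ≤ l.foldl max b := by
  intro l
  induction l with
  | nil => intro b; simp
  | cons x u ih =>
    intro b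
    constructor
    · exact le_trans (le_max_left b x) (ih (max b x)).1
    · intro y hy
      rcases List.mem_cons.1 hy with rfl | hyu
      · exact le_trans (le_max_right b y) (ih (max b y)).1
      · exact (ih (max b x)).2 y hyu

-- foldl max is the seed or an element
lemma pv_foldmax_mem : ∀ (l : List Int) (b : Int),
    l.foldl max b = b ∨ l.foldl max b ∈ l := by
  intro l
  induction l with
  | nil => intro b; simp
  | cons x u ih =>
    intro b
    rcases ih (max b x) with h | h
    · by_cases hx : x ≤ b
      · left
        rw [List.foldl_cons, h, max_eq_left hx]
      · right
        rw [List.foldl_cons, h, max_eq_right (not_le.1 hx).le]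
        simp
    · right; exact List.mem_cons_of_mem _ h

-- pvGaps over a window of l, expressed by indices
lemma pv_gaps_window : ∀ (q j : Nat) (l : List Int), j + q < l.length →
    pvGaps (l.getD j 0) ((l.drop (j + 1)).take q)
      = (List.range q).map (fun i => l.getD (j + i + 1) 0 - l.getD (j + i) 0 - 1) := by
  intro q
  induction q with
  | zero => intro j l _; simp [pvGaps]
  | succ q ih =>
    intro j l hlen
    have hj1 : j + 1 < l.length := by omega
    have hdrop : l.drop (j + 1) = l[j + 1] :: l.drop (j + 2) := by
      rw [List.drop_eq_getElem_cons hj1]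
    have hget : l[j + 1] = l.getD (j + 1) 0 := by
      rw [List.getD_eq_getElem l 0 hj1]
    rw [hdrop, List.take_succ_cons, pvGaps, hget]
    have ih' := ih (j + 1) l (by omega)
    rw [show j + 1 + 1 = j + 2 from rfl] at ih'
    rw [ih', List.range_succ_eq_map, List.map_cons, List.map_map]
    refine congrArg₂ List.cons ?_ ?_
    · norm_num
    · apply List.map_congr_left
      intro k _
      have e1 : j + 1 + k + 1 = j + (k + 1) + 1 := by omega
      have e2 : j + 1 + k = j + (k + 1) := by omega
      simp only [Function.comp, e2]

lemma solve_eq (n m : Int) (a : List Int) (h1 : a ≠ []) (h2 : n ≤ (a.length : Int)) :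
    solve n m a = solve_alt n m a := by
  by_cases hn : n ≤ 0
  · -- no gaps: both loops of A are empty and B's guard fires
    have e2 : PySem.List.pyRange 0 (n - 1) 1 = [] := PySem.List.pyRange_one_eq_nil (by omega)
    simp [solve, solve_alt, e2, hn]
  · simp only [solve, solve_alt]
    rw [if_neg hn]
    set s := PySem.List.sorted a (fun x => x) with hs
    have hslen : s.length = a.length := PySem.List.length_sorted a _ _
    obtain ⟨x, t, hxt⟩ : ∃ x t, s = x :: t := by
      cases hsc : s with
      | nil =>
        exfalso
        rw [hsc] at hslen
        simp at hslen
        exact h1 (List.eq_nil_of_length_eq_zero hslen.symm)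
      | cons y u => exact ⟨y, u, rfl⟩
    have ha0 : PySem.List.pyGetD s 0 0 = x := by rw [hxt]; simp [PySem.List.pyGetD_zero_cons]
    rw [ha0]
    set s2 := s ++ [m + x] with hs2
    have hs2len : s2.length = a.length + 1 := by rw [hs2]; simp [hslen]
    set f : Int → Int := fun i => PySem.List.pyGetD s2 (i + 1) 0 - PySem.List.pyGetD s2 i 0 - 1 with hf
    -- A's list d, as a map over range
    rw [PySem.List.foldl_append_singleton_eq_map f _ []]
    simp only [List.nil_append]
    set gaps := (PySem.List.pyRange 0 n 1).map f with hgaps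
    have hgidx : gaps = (List.range n.toNat).map
        (fun k => s2.getD (k + 1) 0 - s2.getD k 0 - 1) := by
      rw [hgaps, PySem.List.pyRange_one]
      have h0 : ((n : Int) - 0).toNat = n.toNat := by omega
      rw [h0, List.map_map]
      apply List.map_congr_left
      intro k _
      have e1 : (0 : Int) + (k : Int) + 1 = ((k + 1 : Nat) : Int) := by omega
      have e2 : (0 : Int) + (k : Int) = ((k : Nat) : Int) := by omega
      simp only [Function.comp, hf]
      rw [e1, e2, PySem.List.pyGetD_natCast, PySem.List.pyGetD_natCast]
    have hglen : gaps.length = n.toNat := by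
      rw [hgidx, List.length_map, List.length_range]
    have hgne : gaps ≠ [] := by
      intro h
      rw [h] at hglen
      simp at hglen
      omega
    -- d.sort()
    set E := PySem.List.sorted gaps (fun x => x) with hE
    have hElen : E.length = n.toNat := by rw [hE, PySem.List.length_sorted, hglen]
    have hEne : E ≠ [] := by
      intro h
      rw [h] at hElen
      simp at hElen
      omega
    have hEperm : E.Perm gaps := PySem.List.sorted_perm gaps _ _
    -- A's value is E's total minus its last (= largest) entry
    have hbound : n - 1 = (E.length : Int) - 1 := by rw [hElen]; omega
    rw [hbound, pv_sum_init E hEne]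
    set L := E.getLast hEne with hL
    have hpw : E.Pairwise (· ≤ ·) := by
      have := PySem.List.sorted_pairwise gaps (fun x => x)
      simpa using this
    have hLmem : L ∈ gaps := hEperm.subset (List.getLast_mem hEne)
    have hLmax : ∀ y ∈ gaps, y ≤ L := by
      intro y hy
      exact pv_le_getLast E hpw hEne y (hEperm.mem_iff.2 hy)
    -- B's slice is the first n elements after the head
    have hx0 : s2.getD 0 0 = x := by rw [hs2, hxt]; simp
    have hslice : PySem.List.slice s2 (some 1) (some (n + 1)) = (s2.drop 1).take n.toNat := by
      rw [PySem.List.slice_toNat s2 (by omega) (by omega)]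
      congr 1
      omega
    -- the window B consumes yields exactly A's gap list
    have hwin : pvGaps x ((s2.drop 1).take n.toNat) = gaps := by
      have := pv_gaps_window n.toNat 0 s2 (by rw [hs2len]; omega)
      simp only [Nat.zero_add] at this
      rw [hx0] at this
      rw [this, hgidx]
    -- run B's fold on the nonempty gap window
    obtain ⟨g0, gs, hg0⟩ : ∃ g0 gs, (s2.drop 1).take n.toNat = g0 :: gs := by
      cases hw : (s2.drop 1).take n.toNat with
      | nil => exfalso; rw [hw] at hwin; exact hgne (hwin.symm ▸ rfl)
      | cons y u => exact ⟨y, u, rfl⟩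
    rw [hslice, hg0, List.foldl_cons]
    have hstep0 : solveBStep (0, none, x) g0 = (0 + (g0 - x - 1), some (g0 - x - 1), g0) := rfl
    rw [hstep0]
    have hgaps_cons : pvGaps x (g0 :: gs) = (g0 - x - 1) :: pvGaps g0 gs := rfl
    -- identify B's max with L
    set B := (pvGaps g0 gs).foldl max (g0 - x - 1) with hB
    have hBgaps : (g0 - x - 1) :: pvGaps g0 gs = gaps := by rw [← hgaps_cons, ← hg0, hwin]
    have hBmem : B ∈ gaps := by
      rw [← hBgaps]
      rcases pv_foldmax_mem (pvGaps g0 gs) (g0 - x - 1) with h | h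
      · rw [hB, h]; simp
      · exact List.mem_cons_of_mem _ h
    have hBmax : ∀ y ∈ gaps, y ≤ B := by
      intro y hy
      rw [← hBgaps] at hy
      rcases List.mem_cons.1 hy with rfl | hyu
      · exact (pv_foldmax_ge (pvGaps g0 gs) (g0 - x - 1)).1
      · exact (pv_foldmax_ge (pvGaps g0 gs) (g0 - x - 1)).2 y hyu
    have hLB : L = B := le_antisymm (hBmax L hLmem) (hLmax B hBmem)
    simp only [pv_fold_snd, pv_fold_fst]
    rw [hLB, hEperm.sum_eq, ← hBgaps]
    simp only [List.sum_cons]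
    ring

-- ===== VERDICT (by name: the statement is the Claim_ definition above) =====
theorem solve_spec : Claim_equal_solve := by
  intro n m a _ hpre
  exact solve_eq n m a hpre.1 hpre.2
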